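-- pv_equiv track=rewrite | github.com/cedriccaille/CSCI_1133 | 11thWeek/hw11/hw11.py | is_decoy
-- ===== SOURCE A (Python) =====
-- def is_decoy(lines):
--     '''
--     Purpose:
--     Input Parameter(s):
--     Return Value:
--     '''
--     decoys = ['A','C','M','E']
--     if len(lines) < 1:
--         return False
--     elif lines[0][0] in decoys:
--         return True
--     elif len(lines) == 1:
--         return False
--     else:
--         return is_decoy(lines[1:])
-- ===== SOURCE B (Python) =====
-- def is_decoy(lines):
--     decoys = ['A', 'C', 'M', 'E']
--     for line in lines:
--         if line[0] in decoys:
--             return True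
--     return False
-- ===== Notes on version B (the rewrite author's own statement) =====
-- stated objective: faster
-- what changed: Replaced the slicing recursion (each step copies lines[1:], O(n^2) total, plus Python recursion-depth cost) by a single iterative for-loop with early return; same predicate, no guards added, so empty-string lines raise IndexError exactly as in A.
import Mathlib
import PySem

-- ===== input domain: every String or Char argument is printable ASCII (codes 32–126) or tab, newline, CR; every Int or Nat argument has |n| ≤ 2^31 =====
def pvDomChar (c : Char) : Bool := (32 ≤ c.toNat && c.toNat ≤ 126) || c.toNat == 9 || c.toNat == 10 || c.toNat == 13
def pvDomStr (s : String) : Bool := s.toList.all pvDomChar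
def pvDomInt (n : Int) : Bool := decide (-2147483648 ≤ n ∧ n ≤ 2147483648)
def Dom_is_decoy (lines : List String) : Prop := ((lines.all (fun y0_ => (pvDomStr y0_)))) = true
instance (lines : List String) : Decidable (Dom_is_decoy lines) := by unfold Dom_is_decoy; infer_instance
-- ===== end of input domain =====

-- B replaces A's slicing recursion by a single iterative loop with early return (simpler; same raising behaviour on empty-string lines).


-- ===== PORT A =====
-- decoys = ['A','C','M','E'] (Python list of one-char strings)
def decoysA : List String := ["A", "C", "M", "E"]

-- literal transliteration of A: len check, head test, len==1 check, recurse on lines[1:]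
def is_decoy (lines : List String) : Bool :=
  if lines.length < 1 then false
  else
    match PySem.List.pyGet? lines 0 with
    | none => false  -- unreachable: lines.length ≥ 1
    | some line =>
      match PySem.Str.pyGet? line 0 with
      | none => false  -- Python raises IndexError here (line = ""); outside Pre_
      | some c =>
        if decoysA.contains (String.ofList [c]) then true
        else if lines.length == 1 then false
        else is_decoy (PySem.List.slice lines (some 1) none)
termination_by lines.length
decreasing_by simp [PySem.List.slice_from_one]; omega

-- ===== PORT B =====
-- literal transliteration of B: for line in lines: if line[0] in decoys: return True; return False
def is_decoy_alt (lines : List String) : Bool :=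
  match lines with
  | [] => false
  | line :: rest =>
    match PySem.Str.pyGet? line 0 with
    | none => false  -- Python raises IndexError here (line = ""); outside Pre_
    | some c =>
      if (["A", "C", "M", "E"] : List String).contains (String.ofList [c]) then true
      else is_decoy_alt rest

-- ===== PRECONDITION & SPEC =====
-- helper for Pre_ only: does s start with a decoy letter? ("" gives false)
def decoyFirst (s : String) : Bool := (["A", "C", "M", "E"] : List String).contains (String.ofList (s.toList.take 1))

-- Pre_ excludes exactly the inputs where Python A raises IndexError: an empty-string line
-- occurring before any line whose first character is a decoy letter.
def Pre_is_decoy (lines : List String) : Prop :=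
  ∀ i, (h : i < lines.length) → lines[i] = "" → ∃ j, ∃ _ : j < lines.length, j < i ∧ decoyFirst lines[j] = true
instance (lines : List String) : Decidable (Pre_is_decoy lines) := by unfold Pre_is_decoy; infer_instance

def pvWitness_is_decoy : List String := ["xy", "Moo"]

def Spec_is_decoy (lines : List String) (out : Bool) : Prop := out = is_decoy_alt lines
instance (lines : List String) (out : Bool) : Decidable (Spec_is_decoy lines out) := by unfold Spec_is_decoy; infer_instance

-- ===== CLAIM (what is proved, stated in full; the proofs are below) =====
def Claim_equal_is_decoy : Prop := ∀ (lines : List String), Dom_is_decoy lines → Pre_is_decoy lines → Spec_is_decoy lines (is_decoy lines)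

-- ===== LEMMAS AND PROOFS =====

-- the two ports agree on every input (on raising inputs both return false at the none branch)
theorem is_decoy_eq_alt (lines : List String) : is_decoy lines = is_decoy_alt lines := by
  induction lines with
  | nil => rw [is_decoy]; rfl
  | cons line rest ih =>
    rw [is_decoy]
    simp only [is_decoy_alt, List.length_cons, PySem.List.pyGet?_zero_cons,
      PySem.List.slice_from_one, List.tail_cons, decoysA]
    have hlen : ¬ (rest.length + 1 < 1) := by omega
    simp only [if_neg hlen]
    cases PySem.Str.pyGet? line 0 with
    | none => rfl
    | some c =>
      cases hc : (["A", "C", "M", "E"] : List String).contains (String.ofList [c]) with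
      | true => simp only [hc]; simp
      | false =>
        simp only [hc, Bool.false_eq_true, if_false]
        cases rest with
        | nil => simp [is_decoy_alt]
        | cons y ys => simpa using ih

-- ===== VERDICT (by name: the statement is the Claim_ definition above) =====
theorem is_decoy_spec : Claim_equal_is_decoy := by
  intro lines _ _
  unfold Spec_is_decoy
  exact is_decoy_eq_alt lines
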